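-- pv_equiv track=rewrite | github.com/NathanZlion/Competitive-Programming | 1402-reducing-dishes/1402-reducing-dishes.py | maxSatisfaction
-- ===== SOURCE A (Python) =====
-- from typing import List
--
-- def maxSatisfaction(satisfaction: List[int]) -> int:
--     n = len(satisfaction)
--     satisfaction.sort()
--     prefixSum = satisfaction.copy()
--
--     for i in range(n-2, -1, -1):
--         prefixSum[i] += prefixSum[i+1]
--     prefixSum.append(0)
--
--     totalSum = 0
--     for index, num in enumerate(satisfaction):
--         totalSum += (num*(index+1))
--
--     res = totalSum
--     for index, num in enumerate(satisfaction):
--         totalSum -= (num + prefixSum[index+1])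
--         res = max(totalSum, res)
--
--     return res
-- ===== SOURCE B (Python) =====
-- def maxSatisfaction(satisfaction):
--     # Sorts the argument in place (same side effect as the original).
--     satisfaction.sort()
--     s = 0        # sum of dishes chosen so far (largest first)
--     total = 0    # like-time coefficient total for those dishes
--     best = 0
--     for x in reversed(satisfaction):
--         s += x
--         total += s
--         best = max(best, total)
--     return best
-- ===== Notes on version B (the rewrite author's own statement) =====
-- stated objective: simpler
-- what changed: Replaces the prefix-sum array, separate weighted-total pass and subtractive rescan with a single reversed pass keeping two running accumulators and a running max.
import Mathlib
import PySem

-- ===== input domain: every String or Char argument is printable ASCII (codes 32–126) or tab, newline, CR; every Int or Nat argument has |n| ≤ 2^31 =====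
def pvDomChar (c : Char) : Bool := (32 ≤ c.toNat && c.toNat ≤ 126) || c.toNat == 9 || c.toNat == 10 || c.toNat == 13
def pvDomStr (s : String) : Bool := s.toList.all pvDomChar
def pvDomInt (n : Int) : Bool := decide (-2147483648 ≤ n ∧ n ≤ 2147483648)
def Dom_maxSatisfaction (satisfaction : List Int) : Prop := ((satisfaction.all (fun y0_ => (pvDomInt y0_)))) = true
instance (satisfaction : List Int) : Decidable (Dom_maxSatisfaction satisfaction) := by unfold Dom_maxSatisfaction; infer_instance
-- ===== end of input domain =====

-- B replaces A's prefix-sum array and subtractive rescan with one reversed pass and two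
-- running accumulators (objective: simpler). Both Pythons sort the argument in place; the
-- equivalence proved here is about the RETURN value only.

-- ===== PORT A =====
def maxSatisfaction (satisfaction : List Int) : Int :=
  let n : Int := satisfaction.length
  let sorted := PySem.List.sorted satisfaction (fun x => x) false
  -- for i in range(n-2, -1, -1): prefixSum[i] += prefixSum[i+1]
  let prefixSum :=
    (PySem.List.pyRange (n - 2) (-1) (-1)).foldl
      (fun ps i =>
        PySem.List.pySetD ps i (PySem.List.pyGetD ps i 0 + PySem.List.pyGetD ps (i + 1) 0))
      sorted
  let prefixSum := prefixSum ++ [0]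
  -- totalSum = sum over enumerate(satisfaction) of num*(index+1)
  let totalSum :=
    (PySem.List.enumerate sorted 0).foldl (fun acc p => acc + p.2 * (p.1 + 1)) 0
  -- res loop: totalSum -= (num + prefixSum[index+1]); res = max(totalSum, res)
  let st :=
    (PySem.List.enumerate sorted 0).foldl
      (fun (st : Int × Int) p =>
        let t := st.1 - (p.2 + PySem.List.pyGetD prefixSum (p.1 + 1) 0)
        (t, max t st.2))
      (totalSum, totalSum)
  st.2

-- ===== PORT B =====
def maxSatisfaction_alt (satisfaction : List Int) : Int :=
  let sorted := PySem.List.sorted satisfaction (fun x => x) false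
  (sorted.reverse.foldl
    (fun (st : Int × Int × Int) x =>
      let s := st.1 + x
      let t := st.2.1 + s
      (s, t, max st.2.2 t))
    (0, 0, 0)).2.2

-- ===== PRECONDITION & SPEC =====
def Spec_maxSatisfaction (satisfaction : List Int) (out : Int) : Prop := out = maxSatisfaction_alt satisfaction
instance (satisfaction : List Int) (out : Int) : Decidable (Spec_maxSatisfaction satisfaction out) := by unfold Spec_maxSatisfaction; infer_instance

-- ===== CLAIM (what is proved, stated in full; the proofs are below) =====
def Claim_equal_maxSatisfaction : Prop := ∀ (satisfaction : List Int), Dom_maxSatisfaction satisfaction → Spec_maxSatisfaction satisfaction (maxSatisfaction satisfaction)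

-- ===== LEMMAS AND PROOFS =====

-- T a = Σ_k (suffix-sum of a starting at k) = Σ_i a_i * (i+1); the like-time total of the whole list
def pvT : List Int → Int
  | [] => 0
  | x :: xs => pvT xs + (x + xs.sum)

-- M a = max over all suffixes s of a (including the empty one) of pvT s
def pvM : List Int → Int
  | [] => 0
  | x :: xs => max (pvT (x :: xs)) (pvM xs)

-- the suffix-sum array A's first loop builds
def pvSS : List Int → List Int
  | [] => []
  | x :: xs => (x + xs.sum) :: pvSS xs

theorem pvSS_getD (a : List Int) (i : Nat) :
    PySem.List.pyGetD (pvSS a ++ [0]) (i : Int) 0 = (a.drop i).sum := by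
  induction a generalizing i with
  | nil =>
    simp only [pvSS, List.nil_append, PySem.List.pyGetD_natCast, List.drop_nil, List.sum_nil]
    cases i <;> simp [List.getD]
  | cons x xs ih =>
    cases i with
    | zero => simp [pvSS]
    | succ j =>
      have := ih j
      simp only [PySem.List.pyGetD_natCast] at this ⊢
      simpa [pvSS, List.getD] using this

-- A's first loop, run from index k-1 down to 0 on the partially-updated array, finishes pvSS
theorem pvLoop1 (a : List Int) :
    ∀ k : Nat, k < a.length →
      (PySem.List.pyRange ((k : Int) - 1) (-1) (-1)).foldl
        (fun ps i =>
          PySem.List.pySetD ps i (PySem.List.pyGetD ps i 0 + PySem.List.pyGetD ps (i + 1) 0))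
        (a.take k ++ pvSS (a.drop k)) = pvSS a := by
  intro k
  induction k with
  | zero =>
    intro _
    rw [PySem.List.pyRange_neg_one_eq_nil (by norm_num)]
    simp
  | succ j ih =>
    intro hk
    have hj : j < a.length := Nat.lt_of_succ_lt hk
    have hcons : PySem.List.pyRange ((↑(j + 1) : Int) - 1) (-1) (-1)
        = (j : Int) :: PySem.List.pyRange ((j : Int) - 1) (-1) (-1) := by
      have : ((↑(j + 1) : Int) - 1) = (j : Int) := by push_cast; ring
      rw [this, PySem.List.pyRange_neg_one_cons (by omega)]
    rw [hcons, List.foldl_cons]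
    -- the state after one step is a.take j ++ pvSS (a.drop j)
    have hstep :
        PySem.List.pySetD (a.take (j + 1) ++ pvSS (a.drop (j + 1))) (j : Int)
          (PySem.List.pyGetD (a.take (j + 1) ++ pvSS (a.drop (j + 1))) (j : Int) 0 +
           PySem.List.pyGetD (a.take (j + 1) ++ pvSS (a.drop (j + 1))) ((j : Int) + 1) 0)
          = a.take j ++ pvSS (a.drop j) := by
      have hdrop : a.drop j = a[j] :: a.drop (j + 1) := List.drop_eq_getElem_cons hj
      have htake : a.take (j + 1) = a.take j ++ [a[j]] := by
        rw [List.take_add_one, List.getElem?_eq_getElem hj]; rfl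
      have hlen : (a.take j).length = j := List.length_take_of_le (Nat.le_of_lt hj)
      have hget1 :
          PySem.List.pyGetD (a.take (j + 1) ++ pvSS (a.drop (j + 1))) (j : Int) 0 = a[j] := by
        rw [PySem.List.pyGetD_natCast, htake, List.append_assoc]
        rw [List.getD_eq_getElem?_getD, List.getElem?_append_right (by omega)]
        simp [hlen]
      have hget2 :
          PySem.List.pyGetD (a.take (j + 1) ++ pvSS (a.drop (j + 1))) ((j : Int) + 1) 0
            = (a.drop (j + 1)).sum := by
        have hcast : ((j : Int) + 1) = ((j + 1 : Nat) : Int) := by push_cast; ring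
        rw [hcast, PySem.List.pyGetD_natCast, htake, List.append_assoc]
        rw [List.getD_eq_getElem?_getD, List.getElem?_append_right (by omega)]
        cases hne : a.drop (j + 1) with
        | nil => exfalso; have := List.drop_eq_nil_iff.mp hne; omega
        | cons c cs =>
          have : cs = a.drop (j + 1 + 1) := by
            have := congrArg List.tail hne
            simpa [List.tail_drop] using this.symm
          simp [pvSS, hlen]
      rw [hget1, hget2]
      rw [PySem.List.pySetD_natCast, htake, List.append_assoc]
      rw [List.set_append_right _ _ (by omega)]
      simp only [hlen, Nat.sub_self]
      rw [hdrop]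
      simp [pvSS]
    rw [hstep]
    exact ih hj

-- the full prefixSum array equals pvSS a ++ [0]
theorem pvPrefix_eq (a : List Int) :
    ((PySem.List.pyRange ((a.length : Int) - 2) (-1) (-1)).foldl
        (fun ps i =>
          PySem.List.pySetD ps i (PySem.List.pyGetD ps i 0 + PySem.List.pyGetD ps (i + 1) 0))
        a) = pvSS a := by
  cases a with
  | nil =>
    rw [PySem.List.pyRange_neg_one_eq_nil (by norm_num)]
    rfl
  | cons x xs =>
    have hlen : ((x :: xs).length : Int) - 2 = ((x :: xs).length - 1 : Nat) - 1 := by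
      simp
      omega
    have hinit : (x :: xs).take ((x :: xs).length - 1) ++ pvSS ((x :: xs).drop ((x :: xs).length - 1))
        = x :: xs := by
      have h1 : (x :: xs).drop ((x :: xs).length - 1) = [(x :: xs).getLast (by simp)] := by
        rw [List.drop_length_sub_one (by simp)]
      rw [h1]
      have : pvSS [(x :: xs).getLast (by simp)] = [(x :: xs).getLast (by simp)] := by
        simp [pvSS]
      rw [this, ← h1, List.take_append_drop]
    have := pvLoop1 (x :: xs) ((x :: xs).length - 1) (by simp)
    rw [hinit] at this
    rw [hlen]
    exact this

-- the weighted-total pass computes pvT plus a correction for the start index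
theorem pvTotal_eq (a : List Int) : ∀ (s c : Int),
    (PySem.List.enumerate a s).foldl (fun acc p => acc + p.2 * (p.1 + 1)) c
      = c + pvT a + s * a.sum := by
  induction a with
  | nil => intro s c; simp [pvT]
  | cons x xs ih =>
    intro s c
    rw [PySem.List.enumerate_cons, List.foldl_cons, ih]
    simp [pvT, List.sum_cons]; ring

-- A's final subtractive loop, as a structural recursion on the remaining suffix
def pvLoop2 : List Int → Int × Int → Int × Int
  | [], st => st
  | x :: xs, (t, r) =>
    let t' := t - (x + xs.sum)
    pvLoop2 xs (t', max t' r)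

theorem pvLoop2_eq_fold (a : List Int) : ∀ (xs : List Int) (k : Nat) (t r : Int),
    xs = a.drop k →
    (PySem.List.enumerate xs (k : Int)).foldl
      (fun (st : Int × Int) p =>
        (st.1 - (p.2 + PySem.List.pyGetD (pvSS a ++ [0]) (p.1 + 1) 0),
         max (st.1 - (p.2 + PySem.List.pyGetD (pvSS a ++ [0]) (p.1 + 1) 0)) st.2)) (t, r)
      = pvLoop2 xs (t, r) := by
  intro xs
  induction xs with
  | nil => intro k t r _; simp [pvLoop2]
  | cons x xs' ih =>
    intro k t r h
    have hdrop : xs' = a.drop (k + 1) := by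
      have := congrArg List.tail h
      simpa [List.tail_drop] using this
    have hget : PySem.List.pyGetD (pvSS a ++ [0]) ((k : Int) + 1) 0 = xs'.sum := by
      have hcast : ((k : Int) + 1) = ((k + 1 : Nat) : Int) := by push_cast; ring
      rw [hcast, pvSS_getD, ← hdrop]
    rw [PySem.List.enumerate_cons, List.foldl_cons]
    simp only [hget]
    have hcast2 : ((k : Int) + 1) = ((k + 1 : Nat) : Int) := by push_cast; ring
    rw [hcast2, ih (k + 1) _ _ hdrop]
    rfl

theorem pvLoop2_T (xs : List Int) : ∀ (x r : Int),
    (pvLoop2 (x :: xs) (pvT (x :: xs), r)).2 = max (pvM xs) r := by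
  induction xs with
  | nil =>
    intro x r
    simp [pvLoop2, pvT, pvM]
  | cons y ys ih =>
    intro x r
    have ht : pvT (x :: y :: ys) - (x + (y :: ys).sum) = pvT (y :: ys) := by
      simp [pvT]
    show (pvLoop2 (y :: ys) (pvT (x :: y :: ys) - (x + (y :: ys).sum),
        max (pvT (x :: y :: ys) - (x + (y :: ys).sum)) r)).2 = max (pvM (y :: ys)) r
    rw [ht, ih]
    simp only [pvM]
    omega

-- A computes pvM of the sorted list
theorem pvA_eq (l : List Int) :
    maxSatisfaction l = pvM (PySem.List.sorted l (fun x => x) false) := by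
  unfold maxSatisfaction
  simp only []
  set a := PySem.List.sorted l (fun x => x) with ha
  rw [show (l.length : Int) = (a.length : Int) from by rw [ha, PySem.List.length_sorted]]
  rw [pvPrefix_eq a]
  rw [pvTotal_eq a 0 0]
  cases a with
  | nil => simp [pvM, pvT]
  | cons x xs =>
    have h := pvLoop2_eq_fold (x :: xs) (x :: xs) 0
      (0 + pvT (x :: xs) + 0 * (x :: xs).sum) (0 + pvT (x :: xs) + 0 * (x :: xs).sum) (by simp)
    simp only [Nat.cast_zero] at h
    rw [h]
    have h0 : (0 : Int) + pvT (x :: xs) + 0 * (x :: xs).sum = pvT (x :: xs) := by ring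
    rw [h0, pvLoop2_T]
    simp only [pvM]
    omega

-- B's foldr over the list accumulates (suffix sum, pvT, pvM)
theorem pvB_foldr (a : List Int) :
    a.foldr
      (fun x (st : Int × Int × Int) =>
        (st.1 + x, st.2.1 + (st.1 + x), max st.2.2 (st.2.1 + (st.1 + x))))
      (0, 0, 0) = (a.sum, pvT a, pvM a) := by
  induction a with
  | nil => simp [pvT, pvM]
  | cons x xs ih =>
    rw [List.foldr_cons, ih]
    simp only [pvT, pvM, List.sum_cons, Prod.mk.injEq]
    refine ⟨by ring, by ring, by omega⟩

theorem pvB_eq (l : List Int) :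
    maxSatisfaction_alt l = pvM (PySem.List.sorted l (fun x => x) false) := by
  unfold maxSatisfaction_alt
  simp only [List.foldl_reverse]
  rw [pvB_foldr (PySem.List.sorted l (fun x => x) false)]

-- ===== VERDICT (by name: the statement is the Claim_ definition above) =====
theorem maxSatisfaction_spec : Claim_equal_maxSatisfaction := by
  intro l _
  unfold Spec_maxSatisfaction
  rw [pvA_eq, pvB_eq]
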